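-- pv_equiv track=rewrite | github.com/JamesBear/emnlp2017-bilstm-cnn-crf | data/NER_cn_names_artificial_data/generate_simple_artificial_nonname_dataset.py | generate_single
-- ===== SOURCE A (Python) =====
-- SEPARATOR = ' '
--
-- TAG_OTHER = 'O'
--
-- def generate_single(_pattern, word):
--     out_str = ''
--     for c in _pattern:
--         if c == '@':
--             for _char in word[0]:
--                 out_str += _char + SEPARATOR + TAG_OTHER + '\n'
--         else:
--             out_str += c + SEPARATOR + TAG_OTHER + '\n'
--     return out_str
-- ===== SOURCE B (Python) =====
-- SEPARATOR = ' '
--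
-- TAG_OTHER = 'O'
--
-- def generate_single(_pattern, word):
--     expanded = _pattern.replace('@', word[0]) if '@' in _pattern else _pattern
--     return ''.join(c + SEPARATOR + TAG_OTHER + '\n' for c in expanded)
-- ===== Notes on version B (the rewrite author's own statement) =====
-- stated objective: idiomatic
-- what changed: Replaces A's nested branch-and-concatenate loop by a single library str.replace('@', word[0]) substitution (word[0] touched only when '@' occurs, preserving the IndexError condition) followed by one uniform tagging join over the expanded string.
import Mathlib
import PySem

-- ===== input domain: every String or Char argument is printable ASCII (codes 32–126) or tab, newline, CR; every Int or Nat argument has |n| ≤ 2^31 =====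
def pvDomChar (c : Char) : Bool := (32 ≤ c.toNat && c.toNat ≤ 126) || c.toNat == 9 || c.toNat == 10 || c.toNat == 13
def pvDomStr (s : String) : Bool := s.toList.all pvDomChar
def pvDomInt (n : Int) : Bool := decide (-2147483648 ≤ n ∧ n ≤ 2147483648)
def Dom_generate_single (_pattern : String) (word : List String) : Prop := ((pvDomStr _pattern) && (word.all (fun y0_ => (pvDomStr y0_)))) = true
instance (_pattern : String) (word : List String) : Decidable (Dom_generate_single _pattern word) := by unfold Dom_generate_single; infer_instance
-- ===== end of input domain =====

-- B replaces A's nested branch-and-concatenate loop by one library str.replace substitution of '@' followed by a uniform tagging join (same cost, more idiomatic).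

-- ===== PORT A =====
-- word[0]; outside Pre_ (word = [] with '@' in the pattern) Python raises IndexError, pyGet? is none
def generate_single (_pattern : String) (word : List String) : String :=
  _pattern.toList.foldl
    (fun out_str c =>
      if c == '@' then
        ((PySem.List.pyGet? word 0).getD "").toList.foldl
          (fun s ch => s ++ (String.ofList [ch] ++ " " ++ "O" ++ "\n")) out_str
      else out_str ++ (String.ofList [c] ++ " " ++ "O" ++ "\n"))
    ""

-- ===== PORT B =====
def generate_single_alt (_pattern : String) (word : List String) : String :=
  let expanded : String :=
    if PySem.Str.isIn "@" _pattern then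
      PySem.Str.replace _pattern "@" ((PySem.List.pyGet? word 0).getD "")
    else _pattern
  PySem.Str.join "" (expanded.toList.map (fun c => String.ofList [c] ++ " " ++ "O" ++ "\n"))

-- ===== PRECONDITION & SPEC =====
-- Pre_ excludes exactly the inputs where Python A raises IndexError: word = [] while the pattern contains '@'.
def Pre_generate_single (_pattern : String) (word : List String) : Prop :=
  PySem.Str.isIn "@" _pattern = true → word ≠ []
instance (_pattern : String) (word : List String) : Decidable (Pre_generate_single _pattern word) := by unfold Pre_generate_single; infer_instance

def pvWitness_generate_single : String × List String := ("a@b", ["xy"])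

def Spec_generate_single (_pattern : String) (word : List String) (out : String) : Prop := out = generate_single_alt _pattern word
instance (_pattern : String) (word : List String) (out : String) : Decidable (Spec_generate_single _pattern word out) := by unfold Spec_generate_single; infer_instance

-- ===== CLAIM (what is proved, stated in full; the proofs are below) =====
def Claim_equal_generate_single : Prop := ∀ (_pattern : String) (word : List String), Dom_generate_single _pattern word → Pre_generate_single _pattern word → Spec_generate_single _pattern word (generate_single _pattern word)

-- ===== LEMMAS AND PROOFS =====

-- joining with the empty separator is flattening
theorem pv_chars_join_nil (l : List (List Char)) :
    PySem.Chars.join [] l = l.flatten := by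
  unfold PySem.Chars.join
  induction l with
  | nil => rfl
  | cons a l ih =>
      cases l with
      | nil => simp [List.intercalate, List.intersperse]
      | cons b t =>
          simp [List.intercalate, List.intersperse] at ih ⊢
          simpa using ih

-- inner loop of A: appending the tag of each character equals appending the joined map
theorem pv_inner (u : Char → String) (w : List Char) (s : String) :
    w.foldl (fun s ch => s ++ u ch) s = s ++ PySem.Str.join "" (w.map u) := by
  induction w generalizing s with
  | nil => apply String.ext; simp
  | cons c cs ih =>
      simp only [List.foldl_cons, ih]
      apply String.ext
      simp [pv_chars_join_nil]

-- main loop invariant: A's fold appends the formatted expansion of the pattern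
theorem pv_main (u : Char → String) (w : List Char) (cs : List Char) (s : String) :
    cs.foldl
      (fun out_str c =>
        if c == '@' then w.foldl (fun s ch => s ++ u ch) out_str
        else out_str ++ u c) s
      = s ++ PySem.Str.join "" ((cs.flatMap (fun c => if c == '@' then w else [c])).map u) := by
  induction cs generalizing s with
  | nil => apply String.ext; simp
  | cons c cs ih =>
      rw [List.foldl_cons, ih]
      cases hc : (c == '@')
      · have hne : c ≠ '@' := by simpa using hc
        apply String.ext
        simp [hne, pv_chars_join_nil]
      · have heq : c = '@' := by simpa using hc
        rw [if_pos rfl, pv_inner]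
        apply String.ext
        simp [heq, pv_chars_join_nil]

-- str.replace with a single-character needle is character-wise substitution
theorem pv_go_single (w : List Char) (l : List Char) :
    ∀ (fuel : Nat) (acc : List Char), l.length ≤ fuel →
    PySem.Chars.replace.go ['@'] w fuel l acc
      = acc.reverse ++ l.flatMap (fun c => if c == '@' then w else [c]) := by
  induction l with
  | nil =>
      intro fuel acc _
      cases fuel <;> simp [PySem.Chars.replace.go]
  | cons c t ih =>
      intro fuel acc hlen
      cases fuel with
      | zero => simp at hlen
      | succ f =>
          simp only [PySem.Chars.replace.go]
          by_cases hc : c = '@'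
          · subst hc
            rw [if_pos (by simp [List.isPrefixOf])]
            show PySem.Chars.replace.go ['@'] w f (List.drop ['@'].length ('@' :: t)) (w.reverse ++ acc) = _
            rw [show List.drop (['@'] : List Char).length ('@' :: t) = t from by simp]
            rw [ih f (w.reverse ++ acc) (by simpa using Nat.le_of_succ_le_succ hlen)]
            simp
          · rw [if_neg (by simp [List.isPrefixOf]; exact fun h => hc h.symm)]
            rw [ih f (c :: acc) (by simpa using Nat.le_of_succ_le_succ hlen)]
            simp [hc]

theorem pv_replace_single (w : List Char) (l : List Char) :
    PySem.Chars.replace l ['@'] w = l.flatMap (fun c => if c == '@' then w else [c]) := by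
  unfold PySem.Chars.replace
  rw [if_neg (by simp)]
  simpa using pv_go_single w l l.length [] le_rfl

-- a pattern without '@' is its own substitution
theorem pv_no_at (l : List Char) (w : List Char) (h : '@' ∉ l) :
    l.flatMap (fun c => if c == '@' then w else [c]) = l := by
  induction l with
  | nil => rfl
  | cons c t ih =>
      simp only [List.mem_cons, not_or] at h
      have hc : ¬ c = '@' := fun e => h.1 e.symm
      rw [List.flatMap_cons, if_neg (by simp [hc]), ih h.2]
      simp

-- ===== VERDICT (by name: the statement is the Claim_ definition above) =====
theorem generate_single_spec : Claim_equal_generate_single := by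
  intro _pattern word _hdom _hpre
  unfold Spec_generate_single generate_single generate_single_alt
  rw [pv_main]
  cases hin : PySem.Str.isIn "@" _pattern
  · have hnin : ¬ ("@" : String).toList <:+: _pattern.toList := by
      intro h
      have h2 := (PySem.Str.isIn_iff_infix _ _).mpr h
      rw [hin] at h2
      exact Bool.false_ne_true h2
    have hmem : '@' ∉ _pattern.toList := by
      intro hm
      obtain ⟨s, t, he⟩ := List.mem_iff_append.mp hm
      exact hnin ⟨s, t, by rw [he]; simp⟩
    simp only [hin, Bool.false_eq_true, if_false]
    rw [pv_no_at _ _ hmem]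
    apply String.ext; simp
  · simp only [hin, if_true]
    rw [show (PySem.Str.replace _pattern "@" ((PySem.List.pyGet? word 0).getD "")).toList
          = _pattern.toList.flatMap (fun c => if c == '@' then ((PySem.List.pyGet? word 0).getD "").toList else [c]) from by
        simp [PySem.Str.replace, pv_replace_single]]
    apply String.ext; simp
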